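-- pv_equiv track=rewrite | github.com/Nevad54/convertflow-saas | execution/pdf_tools.py | _is_useful_structured_table
-- ===== SOURCE A (Python) =====
-- def _is_useful_structured_table(rows: list[list[str]]) -> bool:
--     """Reject malformed table detections that collapse into one giant text cell."""
--     if len(rows) < 2:
--         return False
--     width = max(len(row) for row in rows)
--     if width < 2:
--         return False
--     non_empty_per_row = [sum(1 for cell in row if str(cell).strip()) for row in rows]
--     if max(non_empty_per_row, default=0) < 2:
--         return False
--     populated_columns = sum(
--         1
--         for col_index in range(width)
--         if sum(1 for row in rows if col_index < len(row) and str(row[col_index]).strip()) >= 2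
--     )
--     if populated_columns < 2:
--         return False
--     giant_single_cell_rows = sum(
--         1
--         for row, count in zip(rows, non_empty_per_row)
--         if count == 1 and max((len(str(cell).strip()) for cell in row if str(cell).strip()), default=0) >= 160
--     )
--     return giant_single_cell_rows < len(rows) / 2
-- ===== SOURCE B (Python) =====
-- def _is_useful_structured_table(rows: list[list[str]]) -> bool:
--     """Single pass over the grid maintaining per-column population counts,
--     the running max of non-empty cells per row, and the giant-cell row count."""
--     col_counts = []
--     max_nonempty = 0
--     giant = 0
--     for row in rows:
--         stripped = [str(cell).strip() for cell in row]
--         if len(stripped) > len(col_counts):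
--             col_counts = col_counts + [0] * (len(stripped) - len(col_counts))
--         for i, s in enumerate(stripped):
--             if s:
--                 col_counts[i] += 1
--         nonempty = sum(1 for s in stripped if s)
--         if max_nonempty < nonempty:
--             max_nonempty = nonempty
--         if nonempty == 1 and max((len(s) for s in stripped if s), default=0) >= 160:
--             giant += 1
--     return (2 <= len(rows) and 2 <= len(col_counts) and 2 <= max_nonempty
--             and 2 <= sum(1 for c in col_counts if c >= 2)
--             and 2 * giant < len(rows))
-- ===== Notes on version B (the rewrite author's own statement) =====
-- stated objective: faster
-- what changed: B replaces A's three separate nested scans (a per-column scan over all rows, the per-row count list, and the giant-row scan) by a single pass over the rows that maintains a per-column population-count array plus running max-nonempty and giant-row tallies, combined into one final conjunction.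
import Mathlib
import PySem

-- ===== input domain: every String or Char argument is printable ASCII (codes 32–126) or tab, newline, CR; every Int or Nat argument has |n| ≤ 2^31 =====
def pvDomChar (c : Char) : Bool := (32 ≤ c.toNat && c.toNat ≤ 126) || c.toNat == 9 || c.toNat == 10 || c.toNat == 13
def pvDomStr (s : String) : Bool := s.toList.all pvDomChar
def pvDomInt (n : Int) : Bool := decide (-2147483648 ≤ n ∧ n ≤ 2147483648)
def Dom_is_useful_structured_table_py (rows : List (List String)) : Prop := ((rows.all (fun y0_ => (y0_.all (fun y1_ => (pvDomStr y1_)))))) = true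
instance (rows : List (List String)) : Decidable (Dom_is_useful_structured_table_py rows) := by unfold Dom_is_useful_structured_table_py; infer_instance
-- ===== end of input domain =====

-- B replaces A's three separate nested scans (per-column column scan, per-row counts, giant-row scan)
-- by ONE pass over the rows maintaining a per-column population-count array plus two running tallies.

-- ===== PORT A =====
-- literal transliteration of A; 'giant < len(rows)/2' (float) ported exactly as 2*giant < len(rows)
def is_useful_structured_table_py (rows : List (List String)) : Bool :=
  if rows.length < 2 then false
  else
    -- max(len(row) for row in rows): rows ≠ [] here, so .getD 0 is never the default
    let width := ((rows.map List.length).max?).getD 0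
    if width < 2 then false
    else
      let nonEmptyPerRow : List Nat := rows.map (fun row =>
        (row.filter (fun c => (PySem.Str.strip c).toList != [])).length)
      if (nonEmptyPerRow.max?).getD 0 < 2 then false
      else
        let populated := ((List.range width).filter (fun ci =>
          decide (2 ≤ (rows.filter (fun row =>
            decide (ci < row.length) && ((PySem.Str.strip (row.getD ci "")).toList != []))).length))).length
        if populated < 2 then false
        else
          let giant := ((rows.zip nonEmptyPerRow).filter (fun p =>
            p.2 == 1 &&
            decide (160 ≤ ((p.1.filter (fun c => (PySem.Str.strip c).toList != [])).map
                    (fun c => (PySem.Str.strip c).toList.length)).foldl max 0))).length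
          decide (2 * giant < rows.length)

-- ===== PORT B =====
-- pad-and-increment of the running column counts with one row's stripped cells
def pvMerge : List Nat → List String → List Nat
  | cs, [] => cs
  | [], s :: r => (if s.toList != [] then 1 else 0) :: pvMerge [] r
  | k :: cs, s :: r => (k + if s.toList != [] then 1 else 0) :: pvMerge cs r

def pvStep (st : List Nat × Nat × Nat) (row : List String) : List Nat × Nat × Nat :=
  let stripped := row.map PySem.Str.strip
  let cc := pvMerge st.1 stripped
  let ne := (stripped.filter (fun s => s.toList != [])).length
  let mx := if st.2.1 < ne then ne else st.2.1
  let g := st.2.2 +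
    (if ne == 1 &&
        decide (160 ≤ ((stripped.filter (fun s => s.toList != [])).map (fun s => s.toList.length)).foldl max 0)
     then 1 else 0)
  (cc, mx, g)

def is_useful_structured_table_py_alt (rows : List (List String)) : Bool :=
  let st := rows.foldl pvStep ([], 0, 0)
  decide (2 ≤ rows.length) && decide (2 ≤ st.1.length) && decide (2 ≤ st.2.1)
    && decide (2 ≤ (st.1.filter (fun k => decide (2 ≤ k))).length)
    && decide (2 * st.2.2 < rows.length)

-- ===== PRECONDITION & SPEC =====
def Spec_is_useful_structured_table_py (rows : List (List String)) (out : Bool) : Prop := out = is_useful_structured_table_py_alt rows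
instance (rows : List (List String)) (out : Bool) : Decidable (Spec_is_useful_structured_table_py rows out) := by unfold Spec_is_useful_structured_table_py; infer_instance

-- ===== CLAIM (what is proved, stated in full; the proofs are below) =====
def Claim_equal_is_useful_structured_table_py : Prop := ∀ (rows : List (List String)), Dom_is_useful_structured_table_py rows → Spec_is_useful_structured_table_py rows (is_useful_structured_table_py rows)


-- ===== LEMMAS AND PROOFS =====
-- per-row quantities, stated on B's stripped form
def pvCnt (r : List String) : Nat := ((r.map PySem.Str.strip).filter (fun s => s.toList != [])).length
def pvGiantB (r : List String) : Bool :=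
  pvCnt r == 1 && decide (160 ≤ (((r.map PySem.Str.strip).filter (fun s => s.toList != [])).map (fun s => s.toList.length)).foldl max 0)
def pvMergeAll (rows : List (List String)) (cc : List Nat) : List Nat :=
  rows.foldl (fun c r => pvMerge c (r.map PySem.Str.strip)) cc

theorem pvStep_eq (st : List Nat × Nat × Nat) (r : List String) :
    pvStep st r = (pvMerge st.1 (r.map PySem.Str.strip), max st.2.1 (pvCnt r),
      st.2.2 + (if pvGiantB r then 1 else 0)) := by
  simp only [pvStep, pvGiantB, pvCnt, Prod.mk.injEq]
  refine ⟨trivial, ?_, rfl⟩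
  rcases Nat.lt_or_ge st.2.1 ((r.map PySem.Str.strip).filter (fun s => s.toList != [])).length with h | h
  · simp [h, Nat.max_eq_right h.le]
  · simp [Nat.not_lt.mpr h, Nat.max_eq_left h]

theorem pvFold_spec (rows : List (List String)) (cc : List Nat) (m g : Nat) :
    rows.foldl pvStep (cc, m, g) =
      (pvMergeAll rows cc, rows.foldl (fun a r => max a (pvCnt r)) m, g + rows.countP pvGiantB) := by
  induction rows generalizing cc m g with
  | nil => simp [pvMergeAll]
  | cons r rs ih =>
      rw [List.foldl_cons, pvStep_eq, ih]
      simp only [pvMergeAll, List.foldl_cons, List.countP_cons, Prod.mk.injEq]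
      exact ⟨trivial, trivial, by omega⟩

theorem pvMerge_length (cs : List Nat) (ss : List String) :
    (pvMerge cs ss).length = max cs.length ss.length := by
  fun_induction pvMerge cs ss <;> simp_all

theorem pvMerge_getD (cs : List Nat) (ss : List String) (i : Nat) :
    (pvMerge cs ss).getD i 0 =
      cs.getD i 0 + (if h : i < ss.length then (if ss[i].toList != [] then 1 else 0) else 0) := by
  induction ss generalizing cs i with
  | nil => simp [pvMerge]
  | cons s r ih =>
      cases cs with
      | nil =>
          cases i with
          | zero => simp [pvMerge]
          | succ j => simpa [pvMerge] using ih [] j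
      | cons k cs' =>
          cases i with
          | zero => simp [pvMerge]
          | succ j => simpa [pvMerge] using ih cs' j

theorem pvMergeAll_length (rows : List (List String)) (cc : List Nat) :
    (pvMergeAll rows cc).length = rows.foldl (fun a r => max a r.length) cc.length := by
  induction rows generalizing cc with
  | nil => simp [pvMergeAll]
  | cons r rs ih =>
      simp only [pvMergeAll, List.foldl_cons] at *
      rw [ih, pvMerge_length]
      simp

theorem pvMergeAll_getD (rows : List (List String)) (cc : List Nat) (i : Nat) :
    (pvMergeAll rows cc).getD i 0 =
      cc.getD i 0 + rows.countP (fun r => decide (i < r.length) && ((PySem.Str.strip (r.getD i "")).toList != [])) := by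
  induction rows generalizing cc with
  | nil => simp [pvMergeAll]
  | cons r rs ih =>
      simp only [pvMergeAll, List.foldl_cons, List.countP_cons] at *
      rw [ih, pvMerge_getD]
      by_cases h : i < r.length
      · have hm : i < (r.map PySem.Str.strip).length := by simpa using h
        have he : (r.map PySem.Str.strip)[i]'hm = PySem.Str.strip (r.getD i "") := by
          rw [List.getElem_map]
          congr 1
          exact (List.getD_eq_getElem r "" h).symm
        simp only [hm, dif_pos, he, h, decide_true, Bool.true_and]
        split_ifs <;> omega
      · have hm : ¬ i < (r.map PySem.Str.strip).length := by simpa using h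
        simp [h]

theorem max?_getD_zero (l : List Nat) : (l.max?).getD 0 = l.foldl max 0 := by
  cases l with
  | nil => simp
  | cons a as => simp [List.max?]

theorem countP_range_getD (cc : List Nat) (p : Nat → Bool) :
    ((List.range cc.length).filter (fun i => p (cc.getD i 0))).length = (cc.filter p).length := by
  induction cc with
  | nil => simp
  | cons k cs ih =>
      rw [List.length_cons, List.range_succ_eq_map, List.filter_cons, List.filter_cons]
      have hmap : ((List.range cs.length).map Nat.succ).filter (fun i => p ((k::cs).getD i 0))
          = ((List.range cs.length).filter (fun i => p (cs.getD i 0))).map Nat.succ := by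
        rw [List.filter_map]
        rfl
      simp only [List.getD_cons_zero, hmap]
      by_cases hk : p k <;> simp only [hk, if_pos, if_neg, Bool.false_eq_true, not_false_iff,
        List.length_cons, List.length_map] <;> simpa using ih

theorem stripped_filter (r : List String) :
    (r.map PySem.Str.strip).filter (fun s => s.toList != []) =
      (r.filter (fun c => (PySem.Str.strip c).toList != [])).map PySem.Str.strip := by
  rw [List.filter_map]
  rfl

theorem pvCnt_eq (r : List String) :
    pvCnt r = (r.filter (fun c => (PySem.Str.strip c).toList != [])).length := by
  rw [pvCnt, stripped_filter, List.length_map]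

theorem pvGiantB_eq (r : List String) :
    pvGiantB r = ((r.filter (fun c => (PySem.Str.strip c).toList != [])).length == 1 &&
      decide (160 ≤ ((r.filter (fun c => (PySem.Str.strip c).toList != [])).map
        (fun c => (PySem.Str.strip c).toList.length)).foldl max 0)) := by
  rw [pvGiantB, pvCnt_eq, stripped_filter, List.map_map]
  rfl

theorem pvGiant_count (rows : List (List String)) :
    ((rows.zip (rows.map (fun row =>
        (row.filter (fun c => (PySem.Str.strip c).toList != [])).length))).filter (fun p =>
        p.2 == 1 && decide (160 ≤ ((p.1.filter (fun c => (PySem.Str.strip c).toList != [])).map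
          (fun c => (PySem.Str.strip c).toList.length)).foldl max 0))).length
      = rows.countP pvGiantB := by
  induction rows with
  | nil => simp
  | cons r rs ih =>
      simp only [List.map_cons, List.zip_cons_cons, List.filter_cons, List.countP_cons]
      rw [← pvGiantB_eq r]
      by_cases h : pvGiantB r = true
      · rw [if_pos h, if_pos h, List.length_cons, ih]
      · rw [if_neg h, if_neg h, ih, Nat.add_zero]

theorem chain_eq (n W M P G : Nat) :
    (if n < 2 then false else if W < 2 then false else if M < 2 then false
      else if P < 2 then false else decide (2 * G < n)) =
    (decide (2 ≤ n) && decide (2 ≤ W) && decide (2 ≤ M) && decide (2 ≤ P) && decide (2 * G < n)) := by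
  by_cases h1 : n < 2
  · simp [h1, Nat.not_le.mpr h1]
  · by_cases h2 : W < 2
    · simp [h1, h2, Nat.not_lt.mp h1, Nat.not_le.mpr h2]
    · by_cases h3 : M < 2
      · simp [h1, h2, h3, Nat.not_lt.mp h1, Nat.not_lt.mp h2, Nat.not_le.mpr h3]
      · by_cases h4 : P < 2
        · simp [h1, h2, h3, h4, Nat.not_lt.mp h1, Nat.not_lt.mp h2, Nat.not_lt.mp h3, Nat.not_le.mpr h4]
        · simp [h1, h2, h3, h4, Nat.not_lt.mp h1, Nat.not_lt.mp h2, Nat.not_lt.mp h3, Nat.not_lt.mp h4]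

theorem main_eq (rows : List (List String)) :
    is_useful_structured_table_py rows = is_useful_structured_table_py_alt rows := by
  have hw : ((rows.map List.length).max?).getD 0 = (pvMergeAll rows []).length := by
    rw [max?_getD_zero, pvMergeAll_length, List.foldl_map]
    rfl
  have hm : ((rows.map (fun row => (row.filter (fun c => (PySem.Str.strip c).toList != [])).length)).max?).getD 0
      = rows.foldl (fun a r => max a (pvCnt r)) 0 := by
    have hfun : (fun (a : Nat) (row : List String) =>
        max a (row.filter (fun c => (PySem.Str.strip c).toList != [])).length)
        = (fun (a : Nat) (r : List String) => max a (pvCnt r)) := by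
      funext a r
      rw [pvCnt_eq]
    rw [max?_getD_zero, List.foldl_map, hfun]
  have h1 : ∀ ci : Nat, (rows.filter (fun row =>
        decide (ci < row.length) && ((PySem.Str.strip (row.getD ci "")).toList != []))).length
      = (pvMergeAll rows []).getD ci 0 := by
    intro ci
    rw [pvMergeAll_getD]
    simp [List.countP_eq_length_filter]
  have hp : ((List.range ((pvMergeAll rows []).length)).filter (fun ci =>
        decide (2 ≤ (rows.filter (fun row =>
          decide (ci < row.length) && ((PySem.Str.strip (row.getD ci "")).toList != []))).length))).length
      = ((pvMergeAll rows []).filter (fun k => decide (2 ≤ k))).length := by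
    have hpt : (fun ci => decide (2 ≤ (rows.filter (fun row =>
          decide (ci < row.length) && ((PySem.Str.strip (row.getD ci "")).toList != []))).length))
        = (fun ci => decide (2 ≤ (pvMergeAll rows []).getD ci 0)) := by
      funext ci
      rw [h1]
    rw [hpt]
    exact countP_range_getD (pvMergeAll rows []) (fun k => decide (2 ≤ k))
  simp only [is_useful_structured_table_py, is_useful_structured_table_py_alt, pvFold_spec, Nat.zero_add]
  rw [hw, hm, hp, pvGiant_count, chain_eq]

-- ===== VERDICT (by name: the statement is the Claim_ definition above) =====
theorem is_useful_structured_table_py_spec : Claim_equal_is_useful_structured_table_py := by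
  intro rows _
  exact main_eq rows
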